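-- pv_equiv track=rewrite | github.com/coryshain/dnnseg | dnnseg/data.py | score_text_words
-- ===== SOURCE A (Python) =====
-- def get_text_word_starts_and_ends(words):
--     bounds = []
--
--     x0 = 0
--     for ii, wi in enumerate(words):
--         (b1,b2) = (x0, x0 + len(words[ii]))
--         bounds.append((b1, b2))
--         x0 += len(words[ii])
--
--     return bounds
--
-- def score_text_words(true, pred):
--     tp = 0
--     fp = 0
--     fn = 0
--
--     for w_true, w_pred in zip(true, pred):
--         bounds_true = set(get_text_word_starts_and_ends(w_true))
--         bounds_pred = set(get_text_word_starts_and_ends(w_pred))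
--
--         tp += len(bounds_true.intersection(bounds_pred))
--         fp += len(bounds_pred - bounds_true)
--         fn += len(bounds_true - bounds_pred)
--
--     return tp, fp, fn
-- ===== SOURCE B (Python) =====
-- def _bound_list(words):
--     # sorted (start, end) bounds with consecutive duplicates (from zero-length
--     # words) collapsed, built in one pass
--     out = []
--     x0 = 0
--     for w in words:
--         b = (x0, x0 + len(w))
--         if not out or out[-1] != b:
--             out.append(b)
--         x0 += len(w)
--     return out
--
--
-- def score_text_words(true, pred):
--     tp = 0
--     fp = 0
--     fn = 0
--     for w_true, w_pred in zip(true, pred):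
--         bt = _bound_list(w_true)
--         bp = _bound_list(w_pred)
--         i = 0
--         j = 0
--         while i < len(bt) and j < len(bp):
--             if bt[i] == bp[j]:
--                 tp += 1
--                 i += 1
--                 j += 1
--             elif bt[i] < bp[j]:
--                 fn += 1
--                 i += 1
--             else:
--                 fp += 1
--                 j += 1
--         fn += len(bt) - i
--         fp += len(bp) - j
--     return tp, fp, fn
-- ===== Notes on version B (the rewrite author's own statement) =====
-- stated objective: alternative
-- what changed: Replaces the per-pair set construction and set intersection/difference by a one-pass bound build that collapses consecutive duplicate bounds plus a two-pointer merge of the two sorted bound lists that counts tp/fp/fn directly, trading CPython's C-level hash sets for a single allocation-free merge pass.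
import Mathlib
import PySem

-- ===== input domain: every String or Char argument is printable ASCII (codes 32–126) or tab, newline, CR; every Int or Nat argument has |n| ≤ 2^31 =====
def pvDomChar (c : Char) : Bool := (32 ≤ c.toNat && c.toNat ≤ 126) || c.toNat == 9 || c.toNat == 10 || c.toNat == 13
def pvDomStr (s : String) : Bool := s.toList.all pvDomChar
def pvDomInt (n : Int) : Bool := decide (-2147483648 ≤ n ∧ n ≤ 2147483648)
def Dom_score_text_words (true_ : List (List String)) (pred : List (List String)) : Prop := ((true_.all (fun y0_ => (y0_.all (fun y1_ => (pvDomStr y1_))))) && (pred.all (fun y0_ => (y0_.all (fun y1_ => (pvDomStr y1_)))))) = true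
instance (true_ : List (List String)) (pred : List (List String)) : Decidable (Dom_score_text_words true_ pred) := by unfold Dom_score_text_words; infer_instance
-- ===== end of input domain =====

-- B replaces the per-pair set intersection/difference by a one-pass build of the
-- (already sorted) bound lists with consecutive duplicates collapsed, followed by
-- a two-pointer merge that counts tp/fp/fn in a single pass.

-- ===== PORT A =====
-- for ii, wi in enumerate(words): append (x0, x0+len(words[ii])); x0 += len(words[ii])
-- (words[ii] is exactly wi, the enumerate payload)
def get_text_word_starts_and_ends (words : List String) : List (Int × Int) :=
  ((PySem.List.enumerate words).foldl
    (fun (st : List (Int × Int) × Int) iw =>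
      (st.1 ++ [(st.2, st.2 + PySem.Str.len iw.2)], st.2 + PySem.Str.len iw.2))
    ([], 0)).1

def score_text_words (true_ : List (List String)) (pred : List (List String)) : Int × Int × Int :=
  (true_.zip pred).foldl
    (fun (st : Int × Int × Int) wp =>
      let bounds_true := PySem.Set.ofList (get_text_word_starts_and_ends wp.1)
      let bounds_pred := PySem.Set.ofList (get_text_word_starts_and_ends wp.2)
      (st.1 + PySem.Set.len (PySem.Set.inter bounds_true bounds_pred),
       st.2.1 + PySem.Set.len (PySem.Set.diff bounds_pred bounds_true),
       st.2.2 + PySem.Set.len (PySem.Set.diff bounds_true bounds_pred)))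
    (0, 0, 0)

-- ===== PORT B =====
-- _bound_list: one pass; append b unless out is nonempty and out[-1] == b
def boundList (words : List String) : List (Int × Int) :=
  (words.foldl
    (fun (st : List (Int × Int) × Int) w =>
      let b : Int × Int := (st.2, st.2 + PySem.Str.len w)
      ((if st.1 = [] ∨ st.1.getLast? ≠ some b then st.1 ++ [b] else st.1),
       st.2 + PySem.Str.len w))
    ([], 0)).1

-- Python's lexicographic '<' on (int, int) tuples
def tupLt (a b : Int × Int) : Bool :=
  decide (a.1 < b.1 ∨ (a.1 = b.1 ∧ a.2 < b.2))

-- the while-loop over indices i, j plus the two tail additions after it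
def mergeLoop : List (Int × Int) → List (Int × Int) → Int × Int × Int → Int × Int × Int
  | [], bp, st => (st.1, st.2.1 + (bp.length : Int), st.2.2)
  | x :: bt, [], st => (st.1, st.2.1, st.2.2 + ((x :: bt).length : Int))
  | x :: bt, y :: bp, st =>
    if x = y then mergeLoop bt bp (st.1 + 1, st.2.1, st.2.2)
    else if tupLt x y then mergeLoop bt (y :: bp) (st.1, st.2.1, st.2.2 + 1)
    else mergeLoop (x :: bt) bp (st.1, st.2.1 + 1, st.2.2)
  termination_by bt bp _ => bt.length + bp.length

def score_text_words_alt (true_ : List (List String)) (pred : List (List String)) : Int × Int × Int :=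
  (true_.zip pred).foldl
    (fun (st : Int × Int × Int) wp => mergeLoop (boundList wp.1) (boundList wp.2) st)
    (0, 0, 0)

-- ===== PRECONDITION & SPEC =====
def Spec_score_text_words (true_ : List (List String)) (pred : List (List String)) (out : Int × Int × Int) : Prop := out = score_text_words_alt true_ pred
instance (true_ : List (List String)) (pred : List (List String)) (out : Int × Int × Int) : Decidable (Spec_score_text_words true_ pred out) := by unfold Spec_score_text_words; infer_instance

-- ===== CLAIM (what is proved, stated in full; the proofs are below) =====
def Claim_equal_score_text_words : Prop := ∀ (true_ : List (List String)) (pred : List (List String)), Dom_score_text_words true_ pred → Spec_score_text_words true_ pred (score_text_words true_ pred)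

-- ===== LEMMAS AND PROOFS =====

-- the (start, end) bounds of the words starting at offset x0 (spec of A's helper)
def boundsOf : Int → List String → List (Int × Int)
  | _, [] => []
  | x0, w :: ws => (x0, x0 + PySem.Str.len w) :: boundsOf (x0 + PySem.Str.len w) ws

-- collapse duplicates equal to the last kept element (spec of B's build)
def ded : Option (Int × Int) → List (Int × Int) → List (Int × Int)
  | _, [] => []
  | last, a :: r => if some a = last then ded last r else a :: ded (some a) r

def pLe (a b : Int × Int) : Prop := a.1 < b.1 ∨ (a.1 = b.1 ∧ a.2 ≤ b.2)
def pLt (a b : Int × Int) : Prop := a.1 < b.1 ∨ (a.1 = b.1 ∧ a.2 < b.2)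

theorem tupLt_iff (a b : Int × Int) : tupLt a b = true ↔ pLt a b := by
  simp [tupLt, pLt]

theorem foldA_eq (ws : List String) : ∀ (n : Int) (acc : List (Int × Int)) (x0 : Int),
    ((PySem.List.enumerate ws n).foldl
      (fun (st : List (Int × Int) × Int) iw =>
        (st.1 ++ [(st.2, st.2 + PySem.Str.len iw.2)], st.2 + PySem.Str.len iw.2))
      (acc, x0)).1 = acc ++ boundsOf x0 ws := by
  induction ws with
  | nil => intro n acc x0; simp [PySem.List.enumerate_nil, boundsOf]
  | cons w ws ih =>
    intro n acc x0
    rw [PySem.List.enumerate_cons, List.foldl_cons]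
    simpa [boundsOf] using ih (n+1) (acc ++ [(x0, x0 + PySem.Str.len w)]) (x0 + PySem.Str.len w)

theorem gtwsae_eq (ws : List String) : get_text_word_starts_and_ends ws = boundsOf 0 ws := by
  unfold get_text_word_starts_and_ends
  simpa using foldA_eq ws 0 [] 0

theorem foldB_eq (ws : List String) : ∀ (acc : List (Int × Int)) (x0 : Int),
    ((ws.foldl
      (fun (st : List (Int × Int) × Int) w =>
        let b : Int × Int := (st.2, st.2 + PySem.Str.len w)
        ((if st.1 = [] ∨ st.1.getLast? ≠ some b then st.1 ++ [b] else st.1),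
         st.2 + PySem.Str.len w))
      (acc, x0)).1) = acc ++ ded acc.getLast? (boundsOf x0 ws) := by
  induction ws with
  | nil => intro acc x0; simp [boundsOf, ded]
  | cons w ws ih =>
    intro acc x0
    rw [List.foldl_cons]
    by_cases h : acc.getLast? = some (x0, x0 + PySem.Str.len w)
    · have hacc : acc ≠ [] := by
        intro he; rw [he] at h; simp at h
      have hcond : ¬ (acc = [] ∨ acc.getLast? ≠ some (x0, x0 + PySem.Str.len w)) := by
        simp [hacc, h]
      simp only [hcond, ite_false]
      rw [ih acc (x0 + PySem.Str.len w)]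
      simp [boundsOf, ded, h]
    · have hcond : (acc = [] ∨ acc.getLast? ≠ some (x0, x0 + PySem.Str.len w)) := Or.inr h
      simp only [hcond, ite_true]
      rw [ih (acc ++ [(x0, x0 + PySem.Str.len w)]) (x0 + PySem.Str.len w)]
      have h' : ¬ (some (x0, x0 + PySem.Str.len w) = acc.getLast?) := fun he => h he.symm
      simp [boundsOf, ded, List.getLast?_append]
      intro he
      exact absurd he (by simpa [PySem.Str.len] using h')

theorem boundList_eq (ws : List String) : boundList ws = ded none (boundsOf 0 ws) := by
  unfold boundList
  simpa using foldB_eq ws [] 0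

theorem ded_sublist : ∀ (l : List (Int × Int)) (last : Option (Int × Int)), (ded last l).Sublist l := by
  intro l
  induction l with
  | nil => intro last; simp [ded]
  | cons a r ih =>
    intro last
    by_cases h : some a = last
    · simp only [ded, h, if_pos]
      exact (ih last).trans (List.sublist_cons_self a r)
    · simp only [ded, h, if_neg, ite_false]
      exact (ih (some a)).cons₂ a

theorem ded_some_eq (l : List (Int × Int)) : ∀ (x : Int × Int),
    ded (some x) l = ded none (l.dropWhile (fun a => a == x)) := by
  induction l with
  | nil => intro x; simp [ded]
  | cons a r ih =>
    intro x
    by_cases h : a = x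
    · subst h
      simp only [ded, if_pos rfl, List.dropWhile_cons, beq_self_eq_true, ite_true]
      exact ih a
    · have hb : (a == x) = false := beq_false_of_ne h
      have h1 : ¬ (some a = some x) := by simp [h]
      simp [ded, h1, hb, List.dropWhile_cons]

theorem discard_of_not_mem {s : List (Int × Int)} {x : Int × Int} (h : x ∉ s) :
    PySem.Set.discard s x = s := by
  unfold PySem.Set.discard
  rw [List.filter_eq_self]
  intro y hy
  simp only [Bool.not_eq_eq_eq_not, Bool.not_true, beq_eq_false_iff_ne]
  exact fun he => h (he ▸ hy)

theorem ofList_cons_cons (x : Int × Int) (r : List (Int × Int)) :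
    PySem.Set.ofList (x :: x :: r) = PySem.Set.ofList (x :: r) := by
  rw [PySem.Set.ofList_cons, PySem.Set.ofList_cons]
  congr 1
  simp [PySem.Set.discard, List.filter_filter]

theorem ofList_dropWhile (xs : List (Int × Int)) : ∀ (x : Int × Int),
    PySem.Set.ofList (x :: xs) = PySem.Set.ofList (x :: xs.dropWhile (fun a => a == x)) := by
  induction xs with
  | nil => intro x; simp
  | cons y r ih =>
    intro x
    by_cases h : y = x
    · subst h
      rw [List.dropWhile_cons]
      simp only [beq_self_eq_true, ite_true]
      rw [ofList_cons_cons]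
      exact ih y
    · have hb : (y == x) = false := beq_false_of_ne h
      simp [List.dropWhile_cons, hb]

theorem pLe_antisymm {a b : Int × Int} (h1 : pLe a b) (h2 : pLe b a) : a = b := by
  obtain ⟨a1, a2⟩ := a
  obtain ⟨b1, b2⟩ := b
  simp only [pLe] at h1 h2
  simp only [Prod.mk.injEq]
  omega

theorem not_mem_dropWhile {x : Int × Int} {xs : List (Int × Int)}
    (h : (x :: xs).Pairwise pLe) : x ∉ xs.dropWhile (fun a => a == x) := by
  induction xs with
  | nil => simp
  | cons y r ih =>
    rw [List.dropWhile_cons]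
    by_cases hy : y = x
    · subst hy
      simp only [beq_self_eq_true, ite_true]
      apply ih
      have hc := List.pairwise_cons.mp h
      have hc2 := List.pairwise_cons.mp hc.2
      exact List.pairwise_cons.mpr ⟨fun b hb => hc.1 b (List.mem_cons_of_mem _ hb), hc2.2⟩
    · have hb : (y == x) = false := beq_false_of_ne hy
      simp only [hb, Bool.false_eq_true, ite_false]
      intro hmem
      rcases List.mem_cons.mp hmem with he | hr
      · exact hy he.symm
      · have h1 : pLe x y := (List.pairwise_cons.mp h).1 y (List.mem_cons_self)
        have hp2 := (List.pairwise_cons.mp h).2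
        have h2 : pLe y x := (List.pairwise_cons.mp hp2).1 x hr
        exact hy (pLe_antisymm h2 h1)

theorem mem_boundsOf : ∀ (ws : List String) (x0 : Int) (p : Int × Int),
    p ∈ boundsOf x0 ws → x0 ≤ p.1 ∧ p.1 ≤ p.2 := by
  intro ws
  induction ws with
  | nil => intro x0 p h; simp [boundsOf] at h
  | cons w rest ih =>
    intro x0 p h
    have hw : (0 : Int) ≤ PySem.Str.len w := by
      simp [PySem.Str.len]
    rcases List.mem_cons.mp h with he | hr
    · subst he
      dsimp only
      omega
    · have := ih (x0 + PySem.Str.len w) p hr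
      omega

theorem pairwise_boundsOf : ∀ (ws : List String) (x0 : Int), (boundsOf x0 ws).Pairwise pLe := by
  intro ws
  induction ws with
  | nil => intro x0; simp [boundsOf]
  | cons w rest ih =>
    intro x0
    have hw : (0 : Int) ≤ PySem.Str.len w := by
      simp [PySem.Str.len]
    rw [boundsOf]
    constructor
    · intro p hp
      have hm := mem_boundsOf rest (x0 + PySem.Str.len w) p hp
      simp only [pLe]
      omega
    · exact ih (x0 + PySem.Str.len w)

theorem ofList_eq_ded : ∀ (n : Nat) (l : List (Int × Int)), l.length = n → l.Pairwise pLe →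
    PySem.Set.ofList l = ded none l := by
  intro n
  induction n using Nat.strong_induction_on with
  | _ n ih =>
    intro l hlen hp
    match l with
    | [] => simp [ded, PySem.Set.ofList, PySem.Set.empty]
    | x :: xs =>
      have hp_xs : xs.Pairwise pLe := (List.pairwise_cons.mp hp).2
      have hd_sub : (xs.dropWhile (fun a => a == x)).Sublist xs := List.dropWhile_sublist _
      have hp_d : (xs.dropWhile (fun a => a == x)).Pairwise pLe :=
        List.Pairwise.sublist hd_sub hp_xs
      have hlt : (xs.dropWhile (fun a => a == x)).length < n := by
        have := hd_sub.length_le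
        simp at hlen
        omega
      have ihd := ih _ hlt (xs.dropWhile (fun a => a == x)) rfl hp_d
      have hx : x ∉ xs.dropWhile (fun a => a == x) := not_mem_dropWhile hp
      have hx2 : x ∉ PySem.Set.ofList (xs.dropWhile (fun a => a == x)) := by
        rw [PySem.Set.mem_ofList]; exact hx
      calc PySem.Set.ofList (x :: xs)
          = PySem.Set.ofList (x :: xs.dropWhile (fun a => a == x)) := ofList_dropWhile xs x
        _ = x :: PySem.Set.discard (PySem.Set.ofList (xs.dropWhile (fun a => a == x))) x :=
            PySem.Set.ofList_cons _ _
        _ = x :: PySem.Set.ofList (xs.dropWhile (fun a => a == x)) := by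
            rw [discard_of_not_mem hx2]
        _ = x :: ded none (xs.dropWhile (fun a => a == x)) := by rw [ihd]
        _ = x :: ded (some x) xs := by rw [ded_some_eq]
        _ = ded none (x :: xs) := by simp [ded]

theorem pairwise_lt_ded {l : List (Int × Int)} (h : l.Pairwise pLe) :
    (ded none l).Pairwise pLt := by
  have hofl : PySem.Set.ofList l = ded none l := ofList_eq_ded l.length l rfl h
  have hnd : (ded none l).Nodup := hofl ▸ PySem.Set.nodup_ofList l
  have hple : (ded none l).Pairwise pLe := List.Pairwise.sublist (ded_sublist l none) h
  have := hple.and hnd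
  refine this.imp ?_
  rintro ⟨a1, a2⟩ ⟨b1, b2⟩ ⟨h1, h2⟩
  simp only [pLe] at h1
  simp only [pLt]
  simp only [ne_eq, Prod.mk.injEq, not_and] at h2
  by_cases he : a1 = b1
  · subst he
    rcases h1 with h1 | h1
    · omega
    · have := h2 rfl
      omega
  · omega

theorem pLt_ne {a b : Int × Int} (h : pLt a b) : a ≠ b := by
  obtain ⟨a1, a2⟩ := a; obtain ⟨b1, b2⟩ := b
  simp only [pLt] at h
  simp only [ne_eq, Prod.mk.injEq, not_and]
  omega

theorem pLt_trans {a b c : Int × Int} (h1 : pLt a b) (h2 : pLt b c) : pLt a c := by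
  obtain ⟨a1, a2⟩ := a; obtain ⟨b1, b2⟩ := b; obtain ⟨c1, c2⟩ := c
  simp only [pLt] at *
  omega

theorem pLt_asymm {a b : Int × Int} (h1 : pLt a b) (h2 : pLt b a) : False := by
  obtain ⟨a1, a2⟩ := a; obtain ⟨b1, b2⟩ := b
  simp only [pLt] at *
  omega

theorem pLt_of_not {a b : Int × Int} (hne : ¬ a = b) (h : ¬ pLt a b) : pLt b a := by
  obtain ⟨a1, a2⟩ := a; obtain ⟨b1, b2⟩ := b
  simp only [Prod.mk.injEq, not_and] at hne
  simp only [pLt] at *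
  by_cases he : a1 = b1
  · subst he; have := hne rfl; omega
  · omega

theorem mergeLoop_eq : ∀ (xs ys : List (Int × Int)), xs.Pairwise pLt → ys.Pairwise pLt →
    ∀ (t f n : Int),
    mergeLoop xs ys (t, f, n) =
      (t + ((xs.filter (fun a => ys.contains a)).length : Int),
       f + ((ys.filter (fun a => !xs.contains a)).length : Int),
       n + ((xs.filter (fun a => !ys.contains a)).length : Int)) := by
  intro xs ys h1 h2
  induction hN : xs.length + ys.length using Nat.strong_induction_on generalizing xs ys with
  | _ N ih =>
  subst hN
  match xs, ys with
  | [], ys =>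
      intro t f n
      simp [mergeLoop]
  | x :: bt, [] =>
      intro t f n
      simp [mergeLoop]
  | x :: bt, y :: bp =>
      intro t f n
      have hxb : ∀ a ∈ bt, pLt x a := (List.pairwise_cons.mp h1).1
      have hyb : ∀ b ∈ bp, pLt y b := (List.pairwise_cons.mp h2).1
      have h1' : bt.Pairwise pLt := (List.pairwise_cons.mp h1).2
      have h2' : bp.Pairwise pLt := (List.pairwise_cons.mp h2).2
      by_cases hxy : x = y
      · subst hxy
        have ihr := ih (bt.length + bp.length) (by simp only [List.length_cons]; omega) bt bp h1' h2' rfl (t + 1) f n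
        rw [mergeLoop, if_pos rfl, ihr]
        have e1 : (x :: bt).filter (fun a => (x :: bp).contains a)
            = x :: bt.filter (fun a => bp.contains a) := by
          rw [List.filter_cons]
          simp only [List.contains_cons, beq_self_eq_true, Bool.true_or, if_pos]
          congr 1
          apply List.filter_congr
          intro a ha
          have : a ≠ x := fun he => pLt_ne (hxb a ha) he.symm
          simp [this]
        have e2 : (x :: bp).filter (fun a => !(x :: bt).contains a)
            = bp.filter (fun a => !bt.contains a) := by
          rw [List.filter_cons]
          simp only [List.contains_cons, beq_self_eq_true, Bool.true_or, Bool.not_true,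
            Bool.false_eq_true, if_neg, ite_false]
          apply List.filter_congr
          intro b hb
          have : b ≠ x := fun he => pLt_ne (hyb b hb) he.symm
          simp [this]
        have e3 : (x :: bt).filter (fun a => !(x :: bp).contains a)
            = bt.filter (fun a => !bp.contains a) := by
          rw [List.filter_cons]
          simp only [List.contains_cons, beq_self_eq_true, Bool.true_or, Bool.not_true,
            Bool.false_eq_true, if_neg, ite_false]
          apply List.filter_congr
          intro a ha
          have : a ≠ x := fun he => pLt_ne (hxb a ha) he.symm
          simp [this]
        rw [e1, e2, e3]
        simp [List.length_cons]
        all_goals (push_cast; ring)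
      · by_cases hlt : pLt x y
        · have ihr := ih (bt.length + (y :: bp).length) (by simp only [List.length_cons]; omega) bt (y :: bp) h1' h2 rfl t f (n + 1)
          have hxny : x ∉ (y :: bp) := by
            intro hm
            rcases List.mem_cons.mp hm with he | hr
            · exact hxy he
            · exact pLt_asymm hlt (hyb x hr)
          rw [mergeLoop, if_neg hxy, if_pos ((tupLt_iff x y).mpr hlt), ihr]
          have e1 : (x :: bt).filter (fun a => (y :: bp).contains a)
              = bt.filter (fun a => (y :: bp).contains a) := by
            rw [List.filter_cons]
            simp [hxny]
          have e2 : (y :: bp).filter (fun a => !(x :: bt).contains a)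
              = (y :: bp).filter (fun a => !bt.contains a) := by
            apply List.filter_congr
            intro b hb
            have hxb' : pLt x b := by
              rcases List.mem_cons.mp hb with he | hr
              · exact he ▸ hlt
              · exact pLt_trans hlt (hyb b hr)
            have : b ≠ x := fun he => pLt_ne hxb' he.symm
            simp [this]
          have e3 : (x :: bt).filter (fun a => !(y :: bp).contains a)
              = x :: bt.filter (fun a => !(y :: bp).contains a) := by
            rw [List.filter_cons]
            simp [hxny]
          rw [e1, e2, e3]
          simp [List.length_cons]
          all_goals (push_cast; ring)
        · have hylt : pLt y x := pLt_of_not hxy hlt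
          have ihr := ih ((x :: bt).length + bp.length) (by simp only [List.length_cons]; omega) (x :: bt) bp h1 h2' rfl t (f + 1) n
          have hynx : y ∉ (x :: bt) := by
            intro hm
            rcases List.mem_cons.mp hm with he | hr
            · exact hxy he.symm
            · exact pLt_asymm hylt (hxb y hr)
          rw [mergeLoop, if_neg hxy, if_neg (by simp [tupLt_iff, hlt]), ihr]
          have e1 : (x :: bt).filter (fun a => (y :: bp).contains a)
              = (x :: bt).filter (fun a => bp.contains a) := by
            apply List.filter_congr
            intro a ha
            have hya : pLt y a := by
              rcases List.mem_cons.mp ha with he | hr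
              · exact he ▸ hylt
              · exact pLt_trans hylt (hxb a hr)
            have : a ≠ y := fun he => pLt_ne hya he.symm
            simp [this]
          have e2 : (y :: bp).filter (fun a => !(x :: bt).contains a)
              = y :: bp.filter (fun a => !(x :: bt).contains a) := by
            rw [List.filter_cons]
            simp [hynx]
          have e3 : (x :: bt).filter (fun a => !(y :: bp).contains a)
              = (x :: bt).filter (fun a => !bp.contains a) := by
            apply List.filter_congr
            intro a ha
            have hya : pLt y a := by
              rcases List.mem_cons.mp ha with he | hr
              · exact he ▸ hylt
              · exact pLt_trans hylt (hxb a hr)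
            have : a ≠ y := fun he => pLt_ne hya he.symm
            simp [this]
          rw [e1, e2, e3]
          simp [List.length_cons]
          all_goals (push_cast; ring)

theorem pair_step (wt wp : List String) (st : Int × Int × Int) :
    (let bounds_true := PySem.Set.ofList (get_text_word_starts_and_ends wt)
     let bounds_pred := PySem.Set.ofList (get_text_word_starts_and_ends wp)
     ((st.1 + PySem.Set.len (PySem.Set.inter bounds_true bounds_pred),
       st.2.1 + PySem.Set.len (PySem.Set.diff bounds_pred bounds_true),
       st.2.2 + PySem.Set.len (PySem.Set.diff bounds_true bounds_pred)) : Int × Int × Int)) =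
    mergeLoop (boundList wt) (boundList wp) st := by
  obtain ⟨t, f, n⟩ := st
  have ht := pairwise_boundsOf wt 0
  have hp := pairwise_boundsOf wp 0
  have eA : PySem.Set.ofList (boundsOf 0 wt) = boundList wt := by
    rw [boundList_eq, ofList_eq_ded (boundsOf 0 wt).length _ rfl ht]
  have eB : PySem.Set.ofList (boundsOf 0 wp) = boundList wp := by
    rw [boundList_eq, ofList_eq_ded (boundsOf 0 wp).length _ rfl hp]
  have hA : (boundList wt).Pairwise pLt := by
    rw [boundList_eq]; exact pairwise_lt_ded ht
  have hB : (boundList wp).Pairwise pLt := by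
    rw [boundList_eq]; exact pairwise_lt_ded hp
  dsimp only
  rw [gtwsae_eq wt, gtwsae_eq wp, eA, eB,
    mergeLoop_eq (boundList wt) (boundList wp) hA hB t f n]
  simp [PySem.Set.inter, PySem.Set.diff, PySem.Set.len, PySem.Set.contains]

theorem main_eq (true_ pred : List (List String)) :
    score_text_words true_ pred = score_text_words_alt true_ pred := by
  unfold score_text_words score_text_words_alt
  have hf : (fun (st : Int × Int × Int) (wp : List String × List String) =>
      let bounds_true := PySem.Set.ofList (get_text_word_starts_and_ends wp.1)
      let bounds_pred := PySem.Set.ofList (get_text_word_starts_and_ends wp.2)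
      ((st.1 + PySem.Set.len (PySem.Set.inter bounds_true bounds_pred),
        st.2.1 + PySem.Set.len (PySem.Set.diff bounds_pred bounds_true),
        st.2.2 + PySem.Set.len (PySem.Set.diff bounds_true bounds_pred)) : Int × Int × Int))
      = (fun (st : Int × Int × Int) (wp : List String × List String) =>
        mergeLoop (boundList wp.1) (boundList wp.2) st) := by
    funext st wp
    exact pair_step wp.1 wp.2 st
  rw [hf]

-- ===== VERDICT (by name: the statement is the Claim_ definition above) =====
theorem score_text_words_spec : Claim_equal_score_text_words := by
  intro true_ pred _
  unfold Spec_score_text_words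
  exact main_eq true_ pred
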